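-- pv_equiv track=rewrite | github.com/himi1/Codefights | Tournaments/CodeMaster'sTourneySolutionsPart3.py | squareDigitsSequence
-- ===== SOURCE A (Python) =====
-- def squareDigitsSequence(a0):
--
--     def helper(a0, l):
--         if a0 in l:
--             return len(l) + 1
--         l.append(a0)
--         n = [int(x) for x in list(str(a0))]
--         s = 0
--         for i in n:
--             s+= (i**2)
--
--         return helper(s, l)
--
--     return helper(a0, [])
-- ===== SOURCE B (Python) =====
-- def squareDigitsSequence(a0):
--     def step(n):
--         s = 0
--         while n > 0:
--             n, d = divmod(n, 10)
--             s += d * d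
--         return s
--
--     orbit = [a0]
--     while orbit[-1] not in orbit[:-1]:
--         orbit.append(step(orbit[-1]))
--     return len(orbit)
-- ===== Notes on version B (the rewrite author's own statement) =====
-- stated objective: alternative
-- what changed: Replaces the recursive helper that stringifies each value (str/int round-trip per digit) and carries a visited list with a counter-free iterative orbit builder: B extends a single orbit list until its last element repeats an earlier one and returns the orbit's length, computing each digit-square sum arithmetically via divmod instead of through str().
import Mathlib
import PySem

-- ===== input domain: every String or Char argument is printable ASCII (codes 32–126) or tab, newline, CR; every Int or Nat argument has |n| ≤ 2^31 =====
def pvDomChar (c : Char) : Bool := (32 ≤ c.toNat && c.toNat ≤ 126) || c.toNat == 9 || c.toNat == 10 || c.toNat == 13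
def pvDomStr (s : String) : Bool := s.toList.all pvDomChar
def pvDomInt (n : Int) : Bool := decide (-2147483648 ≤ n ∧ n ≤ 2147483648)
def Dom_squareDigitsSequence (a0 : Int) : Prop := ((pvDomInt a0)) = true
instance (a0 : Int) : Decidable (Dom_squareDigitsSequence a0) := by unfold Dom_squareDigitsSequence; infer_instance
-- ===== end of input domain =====

-- B builds the whole orbit list until its last element repeats and returns its length,
-- extracting digits arithmetically with divmod instead of via str() (objective: alternative).

-- ===== PORT A =====
-- sum of squared digits exactly as A computes it: n = [int(x) for x in list(str(a0))], then a for-loop accumulating s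
def pvSdsA (a0 : Int) : Int :=
  let n := (PySem.Int.toChars a0).map (fun c => (PySem.Int.ofChars? [c]).getD 0)
  n.foldl (fun s i => s + i ^ 2) 0

-- A's recursive helper; fuel only makes the recursion total (Python terminates within this fuel on every a0 ≥ 0)
def pvHelperA (fuel : Nat) (a0 : Int) (l : List Int) : Int :=
  match fuel with
  | 0 => 0
  | fuel + 1 =>
    if a0 ∈ l then (l.length : Int) + 1
    else pvHelperA fuel (pvSdsA a0) (l ++ [a0])

def squareDigitsSequence (a0 : Int) : Int := pvHelperA (a0.natAbs + 200) a0 []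

-- ===== PORT B =====
-- B's inner while-loop: s += d*d with n, d = divmod(n, 10); fuel only for totality
def pvDigitsLoop (fuel : Nat) (n : Int) (s : Int) : Int :=
  match fuel with
  | 0 => s
  | fuel + 1 =>
    if n > 0 then pvDigitsLoop fuel (PySem.Int.floordiv n 10) (s + PySem.Int.mod n 10 * PySem.Int.mod n 10)
    else s

def pvStep (n : Int) : Int := pvDigitsLoop (n.natAbs + 1) n 0

-- B's outer while-loop over the growing orbit list: orbit[-1], orbit[:-1], append, len(orbit)
def pvOrbitLoop (fuel : Nat) (orbit : List Int) : Int :=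
  match fuel with
  | 0 => 0
  | fuel + 1 =>
    match orbit.getLast? with
    | none => 0
    | some last =>
      if last ∈ orbit.dropLast then (orbit.length : Int)
      else pvOrbitLoop fuel (orbit ++ [pvStep last])

def squareDigitsSequence_alt (a0 : Int) : Int := pvOrbitLoop (a0.natAbs + 200) [a0]

-- ===== PRECONDITION & SPEC =====
-- Pre_ excludes negative a0, on which A raises ValueError (int('-') on the sign character of str(a0)).
def Pre_squareDigitsSequence (a0 : Int) : Prop := 0 ≤ a0
instance (a0 : Int) : Decidable (Pre_squareDigitsSequence a0) := by unfold Pre_squareDigitsSequence; infer_instance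
def pvWitness_squareDigitsSequence : Int := 16

def Spec_squareDigitsSequence (a0 : Int) (out : Int) : Prop := out = squareDigitsSequence_alt a0
instance (a0 : Int) (out : Int) : Decidable (Spec_squareDigitsSequence a0 out) := by unfold Spec_squareDigitsSequence; infer_instance

-- ===== CLAIM (what is proved, stated in full; the proofs are below) =====
def Claim_equal_squareDigitsSequence : Prop := ∀ (a0 : Int), Dom_squareDigitsSequence a0 → Pre_squareDigitsSequence a0 → Spec_squareDigitsSequence a0 (squareDigitsSequence a0)

-- ===== LEMMAS AND PROOFS =====

-- the decimal digit characters of m, most significant first (proof-only mirror of Nat.toDigitsCore)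
def pvDigits (m : Nat) : List Char :=
  if m / 10 = 0 then [Nat.digitChar (m % 10)]
  else pvDigits (m / 10) ++ [Nat.digitChar (m % 10)]
  decreasing_by exact Nat.div_lt_self (Nat.pos_of_ne_zero (by omega)) (by omega)

-- the digit-square sum of m, as a recursion on m
def pvSq (m : Nat) : Int :=
  if m = 0 then 0
  else pvSq (m / 10) + ((m % 10 : Nat) : Int) ^ 2
  decreasing_by exact Nat.div_lt_self (Nat.pos_of_ne_zero (by assumption)) (by omega)

theorem pvToDigitsCore_eq (f : Nat) : ∀ (m : Nat) (l : List Char), m < f →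
    Nat.toDigitsCore 10 f m l = pvDigits m ++ l := by
  induction f with
  | zero => omega
  | succ f ih =>
    intro m l hm
    rw [pvDigits]
    simp only [Nat.toDigitsCore]
    by_cases h : m / 10 = 0
    · simp [h]
    · simp only [h]
      rw [ih (m / 10) _ (by have := Nat.div_lt_self (Nat.pos_of_ne_zero (by omega)) (by omega : 1 < 10); omega)]
      simp

theorem pvVal_digitChar (d : Nat) (hd : d < 10) :
    (PySem.Int.ofChars? [Nat.digitChar d]).getD 0 = (d : Int) := by
  interval_cases d <;> decide

theorem pvFoldl_pvDigits (m : Nat) : ∀ (acc : Int),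
    (pvDigits m).foldl (fun s c => s + ((PySem.Int.ofChars? [c]).getD 0) ^ 2) acc = acc + pvSq m := by
  induction m using Nat.strong_induction_on with
  | _ m ih =>
    intro acc
    rw [pvDigits]
    by_cases h : m / 10 = 0
    · rw [if_pos h]
      simp only [List.foldl_cons, List.foldl_nil, pvVal_digitChar (m % 10) (Nat.mod_lt _ (by omega))]
      by_cases hm : m = 0
      · subst hm; rw [pvSq]; norm_num
      · rw [pvSq, if_neg hm, h, pvSq]; norm_num
    · rw [if_neg h, List.foldl_append]
      rw [ih (m / 10) (Nat.div_lt_self (Nat.pos_of_ne_zero (by omega)) (by omega)) acc]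
      simp only [List.foldl_cons, List.foldl_nil, pvVal_digitChar (m % 10) (Nat.mod_lt _ (by omega))]
      conv_rhs => rw [pvSq, if_neg (show ¬ m = 0 by omega)]
      ring

theorem pvDigitsLoop_eq (f : Nat) : ∀ (m : Nat) (s : Int), m < f →
    pvDigitsLoop f (m : Int) s = s + pvSq m := by
  induction f with
  | zero => omega
  | succ f ih =>
    intro m s hm
    simp only [pvDigitsLoop]
    by_cases h : (m : Int) > 0
    · rw [if_pos h,
          show PySem.Int.floordiv (m : Int) 10 = ((m / 10 : Nat) : Int) from by
            exact_mod_cast PySem.Int.floordiv_natCast m 10,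
          show PySem.Int.mod (m : Int) 10 = ((m % 10 : Nat) : Int) from by
            exact_mod_cast PySem.Int.mod_natCast m 10]
      rw [ih (m / 10) _ (by have := Nat.div_lt_self (by omega : 0 < m) (by omega : 1 < 10); omega)]
      conv_rhs => rw [pvSq, if_neg (show ¬ m = 0 by omega)]
      ring
    · rw [if_neg h]
      have : m = 0 := by omega
      subst this
      rw [pvSq]; norm_num

theorem pvSq_nonneg (m : Nat) : 0 ≤ pvSq m := by
  induction m using Nat.strong_induction_on with
  | _ m ih =>
    rw [pvSq]
    by_cases h : m = 0
    · simp [h]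
    · rw [if_neg h]
      have := ih (m / 10) (Nat.div_lt_self (Nat.pos_of_ne_zero h) (by omega))
      positivity

theorem pvStep_eq_pvSq (a0 : Int) (h : 0 ≤ a0) : pvStep a0 = pvSq a0.toNat := by
  obtain ⟨m, rfl⟩ : ∃ m : Nat, a0 = (m : Int) := ⟨a0.toNat, (Int.toNat_of_nonneg h).symm⟩
  rw [pvStep, Int.natAbs_natCast, Int.toNat_natCast,
      pvDigitsLoop_eq (m + 1) m 0 (by omega)]
  ring

theorem pvSdsA_eq_pvSq (a0 : Int) (h : 0 ≤ a0) : pvSdsA a0 = pvSq a0.toNat := by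
  obtain ⟨m, rfl⟩ : ∃ m : Nat, a0 = (m : Int) := ⟨a0.toNat, (Int.toNat_of_nonneg h).symm⟩
  rw [pvSdsA]
  simp only [List.foldl_map]
  rw [PySem.Int.toChars, if_neg (by omega), Int.toNat_natCast, Nat.toDigits,
      pvToDigitsCore_eq (m + 1) m [] (by omega), List.append_nil,
      pvFoldl_pvDigits]
  ring

theorem pvSds_eq_step (a0 : Int) (h : 0 ≤ a0) : pvSdsA a0 = pvStep a0 := by
  rw [pvSdsA_eq_pvSq a0 h, pvStep_eq_pvSq a0 h]

theorem pvLoop_eq (fuel : Nat) : ∀ (a0 : Int) (l : List Int), 0 ≤ a0 →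
    pvHelperA fuel a0 l = pvOrbitLoop fuel (l ++ [a0]) := by
  induction fuel with
  | zero => intro a0 l _; rfl
  | succ fuel ih =>
    intro a0 l ha
    simp only [pvHelperA, pvOrbitLoop, List.getLast?_concat, List.dropLast_concat]
    by_cases h : a0 ∈ l
    · rw [if_pos h, if_pos h]
      simp
    · rw [if_neg h, if_neg h]
      rw [ih (pvSdsA a0) (l ++ [a0]) (by rw [pvSdsA_eq_pvSq a0 ha]; exact pvSq_nonneg _)]
      rw [pvSds_eq_step a0 ha]

-- ===== VERDICT (by name: the statement is the Claim_ definition above) =====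
theorem squareDigitsSequence_spec : Claim_equal_squareDigitsSequence := by
  intro a0 _ ha
  unfold Spec_squareDigitsSequence squareDigitsSequence squareDigitsSequence_alt
  exact pvLoop_eq _ a0 [] ha
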